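-- pv_equiv track=rewrite | github.com/serteal/vllm-activations | vllm/activations.py | _build_batch_ranges
-- ===== SOURCE A (Python) =====
-- def _build_batch_ranges(
--     total_inputs: int,
--     batch_size: int | None,
--     batch_token_budget: int | None,
--     token_lens: list[int] | None,
-- ) -> list[tuple[int, int]]:
--     if total_inputs == 0:
--         return []
--
--     if batch_token_budget is None:
--         bs = total_inputs if batch_size is None else batch_size
--         return [
--             (start, min(start + bs, total_inputs))
--             for start in range(0, total_inputs, bs)
--         ]
--
--     if token_lens is None:
--         raise ValueError(
--             "token_lens must be provided when batch_token_budget is set"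
--         )
--
--     ranges: list[tuple[int, int]] = []
--     start = 0
--     cur_tokens = 0
--     cur_count = 0
--     for i, n_tok in enumerate(token_lens):
--         # Always allow at least one sequence in each batch, even if it
--         # exceeds budget.
--         over_budget = cur_count > 0 and (cur_tokens + n_tok > batch_token_budget)
--         over_size = batch_size is not None and cur_count >= batch_size
--         if over_budget or over_size:
--             ranges.append((start, i))
--             start = i
--             cur_tokens = 0
--             cur_count = 0
--         cur_tokens += n_tok
--         cur_count += 1
--     ranges.append((start, total_inputs))
--     return ranges
-- ===== SOURCE B (Python) =====
-- def _build_batch_ranges(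
--     total_inputs: int,
--     batch_size: int | None,
--     batch_token_budget: int | None,
--     token_lens: list[int] | None,
-- ) -> list[tuple[int, int]]:
--     if total_inputs == 0:
--         return []
--
--     if batch_token_budget is None:
--         bs = total_inputs if batch_size is None else batch_size
--         return [
--             (start, min(start + bs, total_inputs))
--             for start in range(0, total_inputs, bs)
--         ]
--
--     if token_lens is None:
--         raise ValueError(
--             "token_lens must be provided when batch_token_budget is set"
--         )
--
--     # Phase 1: compute the batch cut points with an outer per-batch loop and an
--     # inner greedy fill loop (every batch takes at least its first sequence).
--     n = len(token_lens)
--     cuts = [0]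
--     i = 0
--     while i < n:
--         cur = token_lens[i]
--         j = i + 1
--         while (
--             j < n
--             and (batch_size is None or j - i < batch_size)
--             and cur + token_lens[j] <= batch_token_budget
--         ):
--             cur += token_lens[j]
--             j += 1
--         if j < n:
--             cuts.append(j)
--         i = j
--     # Phase 2: pair consecutive cut points; the last batch runs to total_inputs.
--     return list(zip(cuts, cuts[1:] + [total_inputs]))
-- ===== Notes on version B (the rewrite author's own statement) =====
-- stated objective: alternative
-- what changed: The token-budget branch is restructured from A's single enumerate scan that accumulates (start,end) ranges with reset-on-overflow state into two phases: an outer per-batch loop with an inner greedy fill loop that computes the list of batch cut points, then a zip of consecutive cut points (last end = total_inputs) builds the ranges.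
-- intended difference: On token-budget inputs with a nonpositive batch_size and nonempty token_lens, A's 'cur_count >= batch_size' check fires before anything is consumed and it returns a spurious empty leading batch (e.g. [(0, 0), (0, 1), (1, 2)]), while B gives every batch at least one sequence (e.g. [(0, 1), (1, 2)]), which is what the code's own 'always allow at least one sequence in each batch' comment intends. — e.g. on _build_batch_ranges(2, some 0, some 5, some [1, 1]): A returns [(0, 0), (0, 1), (1, 2)], B returns [(0, 1), (1, 2)]
import Mathlib
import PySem

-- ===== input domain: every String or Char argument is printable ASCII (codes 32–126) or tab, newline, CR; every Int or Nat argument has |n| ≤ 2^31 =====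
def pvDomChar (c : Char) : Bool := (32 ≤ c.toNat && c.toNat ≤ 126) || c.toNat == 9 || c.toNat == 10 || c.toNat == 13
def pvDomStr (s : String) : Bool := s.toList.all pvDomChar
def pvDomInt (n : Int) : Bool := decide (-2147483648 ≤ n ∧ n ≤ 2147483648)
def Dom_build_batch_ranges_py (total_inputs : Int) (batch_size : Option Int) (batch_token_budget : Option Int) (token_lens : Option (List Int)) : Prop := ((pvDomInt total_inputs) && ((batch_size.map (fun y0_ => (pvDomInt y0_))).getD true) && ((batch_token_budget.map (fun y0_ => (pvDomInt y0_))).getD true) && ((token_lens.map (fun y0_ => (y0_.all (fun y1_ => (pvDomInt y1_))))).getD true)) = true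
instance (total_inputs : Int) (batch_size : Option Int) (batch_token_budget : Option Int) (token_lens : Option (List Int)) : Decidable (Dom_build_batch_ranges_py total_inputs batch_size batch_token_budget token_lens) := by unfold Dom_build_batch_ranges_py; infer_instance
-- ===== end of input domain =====

-- B restructures the token-budget branch into two phases: an outer per-batch loop with an
-- inner greedy fill loop computes the batch cut points, and a zip of consecutive cut points
-- builds the ranges (alternative decomposition, same O(n) cost).

-- ===== PORT A =====
-- loop body of A's 'for i, n_tok in enumerate(token_lens)' (state: ranges, start, cur_tokens, cur_count)
def pvStepA (budget : Int) (bsO : Option Int) (s : List (Int × Int) × Int × Int × Int) (p : Int × Int) : List (Int × Int) × Int × Int × Int :=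
  let over_budget := decide (0 < s.2.2.2) && decide (budget < s.2.2.1 + p.2)
  let over_size := match bsO with | none => false | some b => decide (b ≤ s.2.2.2)
  let s' := if over_budget || over_size then (s.1 ++ [(s.2.1, p.1)], p.1, (0:Int), (0:Int)) else s
  (s'.1, s'.2.1, s'.2.2.1 + p.2, s'.2.2.2 + 1)

def build_batch_ranges_py (total_inputs : Int) (batch_size : Option Int) (batch_token_budget : Option Int) (token_lens : Option (List Int)) : List (Int × Int) :=
  if total_inputs = 0 then []
  else
    match batch_token_budget with
    | none =>
      let bs := match batch_size with | none => total_inputs | some b => b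
      (PySem.List.pyRange 0 total_inputs bs).map (fun start => (start, min (start + bs) total_inputs))
    | some budget =>
      match token_lens with
      | none => []  -- Python raises ValueError here (excluded by Pre_)
      | some lens =>
        let st := (PySem.List.enumerate lens 0).foldl (pvStepA budget batch_size) ([], 0, 0, 0)
        st.1 ++ [(st.2.1, total_inputs)]

-- ===== PORT B =====
-- inner 'while j < n and (size ok) and cur + token_lens[j] <= budget' loop, returning the final j;
-- the fuel (a totality guard only) is the loop's remaining iteration bound (n - j)
def pvFillF (budget : Int) (bsO : Option Int) (lens : List Int) (n start : Int) : Nat → Int → Int → Int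
  | 0, j, _ => j
  | (f + 1), j, cur =>
    if j < n then
      if (match bsO with | none => true | some b => decide (j - start < b)) then
        match PySem.List.pyGet? lens j with
        | some t => if cur + t ≤ budget then pvFillF budget bsO lens n start f (j + 1) (cur + t) else j
        | none => j  -- unreachable: 0 ≤ j < n = len(lens)
      else j
    else j

def pvFill (lens : List Int) (n budget : Int) (bsO : Option Int) (start j cur : Int) : Int :=
  pvFillF budget bsO lens n start (n - j).toNat j cur

-- outer 'while i < n' loop collecting the cut points; fuel is again the iteration bound (n - i)
def pvOuterF (budget : Int) (bsO : Option Int) (lens : List Int) (n : Int) : Nat → List Int → Int → List Int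
  | 0, cuts, _ => cuts
  | (f + 1), cuts, i =>
    if i < n then
      match PySem.List.pyGet? lens i with
      | some c =>
        let j := pvFill lens n budget bsO i (i + 1) c
        pvOuterF budget bsO lens n f (if j < n then cuts ++ [j] else cuts) j
      | none => cuts  -- unreachable: 0 ≤ i < n = len(lens)
    else cuts

def pvOuter (lens : List Int) (n budget : Int) (bsO : Option Int) (cuts : List Int) (i : Int) : List Int :=
  pvOuterF budget bsO lens n (n - i).toNat cuts i

def build_batch_ranges_py_alt (total_inputs : Int) (batch_size : Option Int) (batch_token_budget : Option Int) (token_lens : Option (List Int)) : List (Int × Int) :=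
  if total_inputs = 0 then []
  else
    match batch_token_budget with
    | none =>
      let bs := match batch_size with | none => total_inputs | some b => b
      (PySem.List.pyRange 0 total_inputs bs).map (fun start => (start, min (start + bs) total_inputs))
    | some budget =>
      match token_lens with
      | none => []  -- Python B raises ValueError here (excluded by Pre_)
      | some lens =>
        let n := PySem.List.len lens
        let cuts := pvOuter lens n budget batch_size [0] 0
        cuts.zip (cuts.tail ++ [total_inputs])

-- ===== PRECONDITION & SPEC =====
-- Pre_ excludes exactly the inputs on which A raises: a zero range step in the size-only
-- branch (batch_size = 0, ValueError), and a missing token_lens in the budget branch (ValueError).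
def Pre_build_batch_ranges_py (total_inputs : Int) (batch_size : Option Int) (batch_token_budget : Option Int) (token_lens : Option (List Int)) : Prop :=
  (batch_token_budget = none → total_inputs = 0 ∨ batch_size ≠ some 0) ∧
  (batch_token_budget ≠ none → total_inputs = 0 ∨ token_lens ≠ none)

instance (total_inputs : Int) (batch_size : Option Int) (batch_token_budget : Option Int) (token_lens : Option (List Int)) : Decidable (Pre_build_batch_ranges_py total_inputs batch_size batch_token_budget token_lens) := by unfold Pre_build_batch_ranges_py; infer_instance

def pvWitness_build_batch_ranges_py : Int × Option Int × Option Int × Option (List Int) := (3, some 2, some 10, some [4, 5, 3])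

-- On token-budget inputs with a nonpositive batch_size and nonempty token_lens, A's
-- 'cur_count >= batch_size' check fires before anything is consumed and it returns a spurious
-- empty leading batch (e.g. [(0, 0), (0, 1), (1, 2)]); B gives every batch at least one
-- sequence (e.g. [(0, 1), (1, 2)]), which is what A's own 'always allow at least one
-- sequence in each batch' comment intends.
def D_build_batch_ranges_py (total_inputs : Int) (batch_size : Option Int) (batch_token_budget : Option Int) (token_lens : Option (List Int)) : Prop :=
  batch_token_budget ≠ none ∧ total_inputs ≠ 0 ∧
  batch_size ≠ none ∧ batch_size.getD 0 ≤ 0 ∧ token_lens.getD [] ≠ []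

instance (total_inputs : Int) (batch_size : Option Int) (batch_token_budget : Option Int) (token_lens : Option (List Int)) : Decidable (D_build_batch_ranges_py total_inputs batch_size batch_token_budget token_lens) := by unfold D_build_batch_ranges_py; infer_instance

def Spec_build_batch_ranges_py (total_inputs : Int) (batch_size : Option Int) (batch_token_budget : Option Int) (token_lens : Option (List Int)) (out : List (Int × Int)) : Prop := ¬ D_build_batch_ranges_py total_inputs batch_size batch_token_budget token_lens → out = build_batch_ranges_py_alt total_inputs batch_size batch_token_budget token_lens
instance (total_inputs : Int) (batch_size : Option Int) (batch_token_budget : Option Int) (token_lens : Option (List Int)) (out : List (Int × Int)) : Decidable (Spec_build_batch_ranges_py total_inputs batch_size batch_token_budget token_lens out) := by unfold Spec_build_batch_ranges_py; infer_instance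

def pvDiffWitness_build_batch_ranges_py : Int × Option Int × Option Int × Option (List Int) := (2, some 0, some 5, some [1, 1])
def pvDiffWitnessOut_build_batch_ranges_py : (List (Int × Int)) × (List (Int × Int)) := ([(0, 0), (0, 1), (1, 2)], [(0, 1), (1, 2)])

-- ===== CLAIM (what is proved, stated in full; the proofs are below) =====
def Claim_unchanged_build_batch_ranges_py : Prop := ∀ (total_inputs : Int) (batch_size : Option Int) (batch_token_budget : Option Int) (token_lens : Option (List Int)), Dom_build_batch_ranges_py total_inputs batch_size batch_token_budget token_lens → Pre_build_batch_ranges_py total_inputs batch_size batch_token_budget token_lens → Spec_build_batch_ranges_py total_inputs batch_size batch_token_budget token_lens (build_batch_ranges_py total_inputs batch_size batch_token_budget token_lens)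
def Claim_changed_build_batch_ranges_py : Prop := Dom_build_batch_ranges_py (pvDiffWitness_build_batch_ranges_py.1) (pvDiffWitness_build_batch_ranges_py.2.1) (pvDiffWitness_build_batch_ranges_py.2.2.1) (pvDiffWitness_build_batch_ranges_py.2.2.2) ∧ Pre_build_batch_ranges_py (pvDiffWitness_build_batch_ranges_py.1) (pvDiffWitness_build_batch_ranges_py.2.1) (pvDiffWitness_build_batch_ranges_py.2.2.1) (pvDiffWitness_build_batch_ranges_py.2.2.2) ∧ D_build_batch_ranges_py (pvDiffWitness_build_batch_ranges_py.1) (pvDiffWitness_build_batch_ranges_py.2.1) (pvDiffWitness_build_batch_ranges_py.2.2.1) (pvDiffWitness_build_batch_ranges_py.2.2.2) ∧ build_batch_ranges_py (pvDiffWitness_build_batch_ranges_py.1) (pvDiffWitness_build_batch_ranges_py.2.1) (pvDiffWitness_build_batch_ranges_py.2.2.1) (pvDiffWitness_build_batch_ranges_py.2.2.2) = pvDiffWitnessOut_build_batch_ranges_py.1 ∧ build_batch_ranges_py_alt (pvDiffWitness_build_batch_ranges_py.1) (pvDiffWitness_build_batch_ranges_py.2.1) (pvDiffWitness_build_batch_ranges_py.2.2.1)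 (pvDiffWitness_build_batch_ranges_py.2.2.2) = pvDiffWitnessOut_build_batch_ranges_py.2 ∧ pvDiffWitnessOut_build_batch_ranges_py.1 ≠ pvDiffWitnessOut_build_batch_ranges_py.2

def Claim_exact_build_batch_ranges_py : Prop := ∀ (total_inputs : Int) (batch_size : Option Int) (batch_token_budget : Option Int) (token_lens : Option (List Int)), Dom_build_batch_ranges_py total_inputs batch_size batch_token_budget token_lens → Pre_build_batch_ranges_py total_inputs batch_size batch_token_budget token_lens → D_build_batch_ranges_py total_inputs batch_size batch_token_budget token_lens → build_batch_ranges_py total_inputs batch_size batch_token_budget token_lens ≠ build_batch_ranges_py_alt total_inputs batch_size batch_token_budget token_lens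

-- ===== LEMMAS AND PROOFS =====
-- one-step unfolding of the inner while loop (the fuel is exactly the remaining iteration bound)
theorem pvFill_step (lens : List Int) (n budget : Int) (bsO : Option Int) (start j cur : Int) :
    pvFill lens n budget bsO start j cur =
      if j < n then
        if (match bsO with | none => true | some b => decide (j - start < b)) then
          match PySem.List.pyGet? lens j with
          | some t => if cur + t ≤ budget then pvFill lens n budget bsO start (j + 1) (cur + t) else j
          | none => j
        else j
      else j := by
  by_cases h : j < n
  · have hk : (n - j).toNat = (n - (j + 1)).toNat + 1 := by omega
    unfold pvFill
    rw [hk]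
    simp [pvFillF, h]
  · unfold pvFill
    rcases hk : (n - j).toNat with _ | k
    · simp [pvFillF, h]
    · simp [pvFillF, h]

-- the inner loop never moves 'j' backwards
theorem pvFillF_ge (budget : Int) (bsO : Option Int) (lens : List Int) (n start : Int) :
    ∀ (f : Nat) (j cur : Int), j ≤ pvFillF budget bsO lens n start f j cur := by
  intro f
  induction f with
  | zero => intro j cur; simp [pvFillF]
  | succ f ih =>
    intro j cur
    simp only [pvFillF]
    split_ifs with h1 h2
    · rcases hg : PySem.List.pyGet? lens j with - | t
      · simp
      · simp only []
        split_ifs with h3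
        · have := ih (j + 1) (cur + t); omega
        · omega
    · omega
    · omega

theorem pvFill_ge (lens : List Int) (n budget : Int) (bsO : Option Int) (start j cur : Int) :
    j ≤ pvFill lens n budget bsO start j cur :=
  pvFillF_ge budget bsO lens n start _ j cur

-- the outer loop's result does not depend on the fuel, as long as it covers the iteration bound
theorem pvOuterF_mono (budget : Int) (bsO : Option Int) (lens : List Int) (n : Int) :
    ∀ (f g : Nat) (cuts : List Int) (i : Int),
      (n - i).toNat ≤ f → (n - i).toNat ≤ g →
      pvOuterF budget bsO lens n f cuts i = pvOuterF budget bsO lens n g cuts i := by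
  intro f
  induction f with
  | zero =>
    intro g cuts i hf hg
    have h : ¬ i < n := by omega
    cases g with
    | zero => rfl
    | succ g => simp [pvOuterF, h]
  | succ f ih =>
    intro g cuts i hf hg
    by_cases h : i < n
    · cases g with
      | zero => omega
      | succ g =>
        simp only [pvOuterF, h, if_pos]
        rcases hc : PySem.List.pyGet? lens i with - | c
        · rfl
        · have he := pvFill_ge lens n budget bsO i (i + 1) c
          exact ih g _ _ (by omega) (by omega)
    · cases g with
      | zero => simp [pvOuterF, h]
      | succ g => simp [pvOuterF, h]

-- one-step unfolding of the outer while loop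
theorem pvOuter_step (lens : List Int) (n budget : Int) (bsO : Option Int) (cuts : List Int) (i : Int) :
    pvOuter lens n budget bsO cuts i =
      if i < n then
        match PySem.List.pyGet? lens i with
        | some c =>
          pvOuter lens n budget bsO
            (if pvFill lens n budget bsO i (i + 1) c < n then cuts ++ [pvFill lens n budget bsO i (i + 1) c] else cuts)
            (pvFill lens n budget bsO i (i + 1) c)
        | none => cuts
      else cuts := by
  by_cases h : i < n
  · have hk : (n - i).toNat = (n - (i + 1)).toNat + 1 := by omega
    unfold pvOuter
    rw [hk]
    simp only [pvOuterF, h, if_pos]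
    rcases hc : PySem.List.pyGet? lens i with - | c
    · rfl
    · have he := pvFill_ge lens n budget bsO i (i + 1) c
      exact pvOuterF_mono budget bsO lens n _ _ _ _ (by omega) (by omega)
  · unfold pvOuter
    rcases hk : (n - i).toNat with _ | k
    · simp [pvOuterF, h]
    · simp [pvOuterF, h]

-- zip ignores a snoc on the left list when the right list is at most as long
theorem pvZipSnocLeft (cuts : List Int) :
    ∀ (ys : List Int) (x : Int), ys.length ≤ cuts.length → (cuts ++ [x]).zip ys = cuts.zip ys := by
  induction cuts with
  | nil => intro ys x h; cases ys <;> simp_all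
  | cons c cs ih =>
    intro ys x h
    cases ys with
    | nil => simp
    | cons y ys => simp_all [List.zip_cons_cons]

-- appending the final end to the right-hand list adds exactly the closing pair
theorem pvZipTailSnoc (cuts : List Int) (h : cuts ≠ []) (t : Int) :
    cuts.zip (cuts.tail ++ [t]) = cuts.zip cuts.tail ++ [(cuts.getLast h, t)] := by
  induction cuts with
  | nil => simp at h
  | cons c cs ih =>
    cases cs with
    | nil => simp
    | cons d ds =>
      simp only [List.tail_cons, List.zip_cons_cons]
      rw [show (c :: d :: ds).getLast h = (d :: ds).getLast (by simp) from List.getLast_cons (by simp)]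
      have := ih (by simp)
      simp only [List.tail_cons] at this
      simp [this]

-- growing the cut list by the new batch start j extends the paired ranges by (s, j)
theorem pvCutsSnoc (cuts : List Int) (hne : cuts ≠ []) (s j : Int) (hlast : cuts.getLast hne = s) :
    (cuts ++ [j]).zip (cuts ++ [j]).tail = cuts.zip cuts.tail ++ [(s, j)] := by
  obtain ⟨c, cs, rfl⟩ := List.exists_cons_of_ne_nil hne
  have htail : ((c :: cs) ++ [j]).tail = (c :: cs).tail ++ [j] := by simp
  rw [htail, pvZipSnocLeft _ _ _ (by simp), pvZipTailSnoc (c :: cs) hne j]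
  rw [hlast]

-- In the middle of filling a batch (start s, cnt = j - s elements consumed, running token sum cur,
-- cut points so far 'cuts' ending at s), A's remaining fold over enumerate equals B's
-- finish-this-batch-then-recurse cut collection, paired up by zip.
theorem pvKey (total budget : Int) (bsO : Option Int) (hbs : ∀ b, bsO = some b → 0 < b)
    (lens : List Int) (n : Int) (hn : (lens.length : Int) = n) :
    ∀ (rest : List Int) (j s cur cnt : Int) (cuts : List Int) (hne : cuts ≠ []),
    rest = lens.drop j.toNat → 0 ≤ s → s < j → j ≤ n → cnt = j - s → cuts.getLast hne = s →
    ((PySem.List.enumerate rest j).foldl (pvStepA budget bsO) (cuts.zip cuts.tail, s, cur, cnt)).1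
      ++ [(((PySem.List.enumerate rest j).foldl (pvStepA budget bsO) (cuts.zip cuts.tail, s, cur, cnt)).2.1, total)]
    = (pvOuter lens n budget bsO (if pvFill lens n budget bsO s j cur < n then cuts ++ [pvFill lens n budget bsO s j cur] else cuts) (pvFill lens n budget bsO s j cur)).zip
      ((pvOuter lens n budget bsO (if pvFill lens n budget bsO s j cur < n then cuts ++ [pvFill lens n budget bsO s j cur] else cuts) (pvFill lens n budget bsO s j cur)).tail ++ [total]) := by
  intro rest
  induction rest with
  | nil =>
    intro j s cur cnt cuts hne hdrop hs0 hsj hjt hcnt hlast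
    have hjlen : lens.length ≤ j.toNat := by
      by_contra hc
      push Not at hc
      have : lens.drop j.toNat ≠ [] := by
        simp [List.drop_eq_nil_iff]; omega
      exact this hdrop.symm
    have hj : j = n := by omega
    have he : pvFill lens n budget bsO s j cur = j := by
      rw [pvFill_step]; simp [hj]
    rw [he, hj]
    simp only [lt_irrefl, ite_false]
    rw [pvOuter_step]
    simp only [lt_irrefl, ite_false]
    rw [pvZipTailSnoc cuts hne total, hlast]
    simp [PySem.List.enumerate_nil]
  | cons tok rest' ih =>
    intro j s cur cnt cuts hne hdrop hs0 hsj hjt hcnt hlast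
    subst hcnt
    have hj0 : 0 ≤ j := by omega
    have hjlt : j.toNat < lens.length := by
      by_contra hc
      push Not at hc
      rw [List.drop_eq_nil_of_le hc] at hdrop
      exact List.cons_ne_nil tok rest' hdrop
    have hjn : j < n := by omega
    have hdecomp := List.drop_eq_getElem_cons hjlt
    rw [← hdrop] at hdecomp
    have hhead : lens[j.toNat] = tok := by
      have := hdecomp
      injection this.symm
    have hdrop' : rest' = lens.drop (j.toNat + 1) := by
      injection hdecomp
    have hget : PySem.List.pyGet? lens j = some tok := by
      rw [PySem.List.pyGet?_eq_some_getElem lens hj0 (by omega), hhead]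
    have hdropnext : rest' = lens.drop (j + 1).toNat := by
      rw [hdrop']
      congr 1
      omega
    have hcpos : (0 : Int) < j - s := by omega
    rw [PySem.List.enumerate_cons, List.foldl_cons]
    cases bsO with
    | none =>
      by_cases hb : budget < cur + tok
      · -- batch closes at j
        have hstep : pvStepA budget none (cuts.zip cuts.tail, s, cur, j - s) ((j : Int), tok) = (cuts.zip cuts.tail ++ [(s, j)], j, tok, 1) := by
          simp [pvStepA, hb, hsj]
        rw [hstep]
        have hfill : pvFill lens n budget none s j cur = j := by
          rw [pvFill_step]
          simp [hjn, hget, hb]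
        have hacc := pvCutsSnoc cuts hne s j hlast
        rw [← hacc]
        have := ih (j + 1) j tok 1 (cuts ++ [j]) (by simp) hdropnext hj0 (by omega) (by omega) (by ring) (by simp)
        rw [this, hfill]
        rw [if_pos hjn]
        conv_rhs => rw [pvOuter_step]
        simp [hjn, hget]
      · -- batch continues
        have hstep : pvStepA budget none (cuts.zip cuts.tail, s, cur, j - s) ((j : Int), tok) = (cuts.zip cuts.tail, s, cur + tok, (j - s) + 1) := by
          simp [pvStepA, hb]
        rw [hstep]
        have hfill : pvFill lens n budget none s j cur = pvFill lens n budget none s (j + 1) (cur + tok) := by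
          rw [pvFill_step]
          simp [hjn, hget]
          intro hb'
          omega
        have := ih (j + 1) s (cur + tok) ((j - s) + 1) cuts hne hdropnext hs0 (by omega) (by omega) (by ring) hlast
        rw [this, hfill]
    | some b =>
      have hbpos : 0 < b := hbs b rfl
      by_cases hov : budget < cur + tok ∨ b ≤ j - s
      · -- batch closes at j
        have hstep : pvStepA budget (some b) (cuts.zip cuts.tail, s, cur, j - s) ((j : Int), tok) = (cuts.zip cuts.tail ++ [(s, j)], j, tok, 1) := by
          rcases hov with hb | hsz
          · simp [pvStepA, hb, hsj]
          · simp [pvStepA, hsz]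
        rw [hstep]
        have hfill : pvFill lens n budget (some b) s j cur = j := by
          rw [pvFill_step]
          by_cases hsz : j - s < b
          · have hb : budget < cur + tok := by
              rcases hov with hb | h
              · exact hb
              · omega
            simp [hjn, hget, hsz, hb]
          · simp [hjn, hsz]
        have hacc := pvCutsSnoc cuts hne s j hlast
        rw [← hacc]
        have := ih (j + 1) j tok 1 (cuts ++ [j]) (by simp) hdropnext hj0 (by omega) (by omega) (by ring) (by simp)
        rw [this, hfill]
        rw [if_pos hjn]
        conv_rhs => rw [pvOuter_step]
        simp [hjn, hget]
      · -- batch continues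
        push Not at hov
        obtain ⟨hb, hsz⟩ := hov
        have hstep : pvStepA budget (some b) (cuts.zip cuts.tail, s, cur, j - s) ((j : Int), tok) = (cuts.zip cuts.tail, s, cur + tok, (j - s) + 1) := by
          simp [pvStepA, show ¬ budget < cur + tok by omega, show ¬ b ≤ j - s by omega]
        rw [hstep]
        have hfill : pvFill lens n budget (some b) s j cur = pvFill lens n budget (some b) s (j + 1) (cur + tok) := by
          rw [pvFill_step]
          have hsz' : j - s < b := by omega
          simp [hjn, hget, hsz', hb]
        have := ih (j + 1) s (cur + tok) ((j - s) + 1) cuts hne hdropnext hs0 (by omega) (by omega) (by ring) hlast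
        rw [this, hfill]

-- A's loop only ever appends to the accumulated range list
theorem pvFoldAccPrefix (budget : Int) (bsO : Option Int) :
    ∀ (ps : List (Int × Int)) (st : List (Int × Int) × Int × Int × Int),
      ∃ t, (List.foldl (pvStepA budget bsO) st ps).1 = st.1 ++ t := by
  intro ps
  induction ps with
  | nil => intro st; exact ⟨[], by simp⟩
  | cons p ps ih =>
    intro st
    rw [List.foldl_cons]
    obtain ⟨t, ht⟩ := ih (pvStepA budget bsO st p)
    have hstep : ∃ u, (pvStepA budget bsO st p).1 = st.1 ++ u := by
      unfold pvStepA
      dsimp only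
      split_ifs with h
      · exact ⟨[(st.2.1, p.1)], rfl⟩
      · exact ⟨[], by simp⟩
    obtain ⟨u, hu⟩ := hstep
    rw [ht, hu]
    exact ⟨u ++ t, by simp⟩

-- B's outer loop only appends cut points, all of them ≥ i + 1
theorem pvOuterCuts (budget : Int) (bsO : Option Int) (lens : List Int) (n : Int) :
    ∀ (f : Nat) (cuts : List Int) (i : Int),
      ∃ suff, pvOuterF budget bsO lens n f cuts i = cuts ++ suff ∧ ∀ x ∈ suff, i + 1 ≤ x := by
  intro f
  induction f with
  | zero => intro cuts i; exact ⟨[], by simp [pvOuterF], by simp⟩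
  | succ f ih =>
    intro cuts i
    by_cases h : i < n
    · simp only [pvOuterF, h, if_pos]
      rcases hc : PySem.List.pyGet? lens i with - | c
      · exact ⟨[], by simp, by simp⟩
      · dsimp only
        have hj := pvFill_ge lens n budget bsO i (i + 1) c
        obtain ⟨suff, hs, hall⟩ := ih (if pvFill lens n budget bsO i (i + 1) c < n then cuts ++ [pvFill lens n budget bsO i (i + 1) c] else cuts) (pvFill lens n budget bsO i (i + 1) c)
        rw [hs]
        by_cases hjn : pvFill lens n budget bsO i (i + 1) c < n
        · rw [if_pos hjn]
          refine ⟨[pvFill lens n budget bsO i (i + 1) c] ++ suff, by simp, ?_⟩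
          intro x hx
          rcases List.mem_append.mp hx with hx | hx
          · simp at hx; omega
          · have := hall x hx; omega
        · rw [if_neg hjn]
          refine ⟨suff, rfl, ?_⟩
          intro x hx
          have := hall x hx; omega
    · simp only [pvOuterF, h, ite_false]
      exact ⟨[], by simp, by simp⟩

-- ===== VERDICT (by name: the statements are the Claim_ definitions above) =====
theorem build_batch_ranges_py_spec : Claim_unchanged_build_batch_ranges_py := by
  unfold Claim_unchanged_build_batch_ranges_py
  intro total bs btb tl _dom hpre
  unfold Spec_build_batch_ranges_py
  intro hD
  unfold build_batch_ranges_py build_batch_ranges_py_alt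
  by_cases h0 : total = 0
  · simp [h0]
  · simp only [if_neg h0]
    cases btb with
    | none => rfl
    | some budget =>
      obtain ⟨-, h2⟩ := hpre
      rcases h2 (by simp) with h | hne
      · exact absurd h h0
      cases tl with
      | none => exact absurd rfl hne
      | some lens =>
        cases lens with
        | nil =>
          simp [PySem.List.enumerate_nil, pvOuter, pvOuterF]
        | cons n0 rest =>
          have hbs' : ∀ b, bs = some b → 0 < b := by
            intro b hb
            by_contra hc
            push Not at hc
            exact hD ⟨by simp, h0, by simp [hb], by simp [hb]; omega, by simp⟩
          dsimp only
          rw [PySem.List.enumerate_cons, List.foldl_cons]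
          have hstep0 : pvStepA budget bs ([], 0, 0, 0) (0, n0) = ([], 0, n0, 1) := by
            cases bs with
            | none => simp [pvStepA]
            | some b =>
              have := hbs' b rfl
              simp [pvStepA, show ¬ b ≤ (0 : Int) by omega]
          rw [hstep0]
          have hkey := pvKey total budget bs hbs' (n0 :: rest) (PySem.List.len (n0 :: rest))
            (by simp) rest 1 0 n0 1 [0] (by simp)
            (by simp) le_rfl one_pos (by simp [PySem.List.len]) (by ring) (by simp)
          simp only [List.tail_cons, List.zip_nil_right] at hkey
          rw [show (0 : Int) + 1 = 1 by ring, hkey]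
          conv_rhs => rw [pvOuter_step]
          simp

theorem build_batch_ranges_py_changed : Claim_changed_build_batch_ranges_py := by
  unfold Claim_changed_build_batch_ranges_py
  decide

theorem build_batch_ranges_py_tight : Claim_exact_build_batch_ranges_py := by
  unfold Claim_exact_build_batch_ranges_py
  intro total bs btb tl _dom _hpre hD
  obtain ⟨hbtb, h0, hbs, hble, htl⟩ := hD
  cases btb with
  | none => exact absurd rfl hbtb
  | some budget =>
    cases bs with
    | none => exact absurd rfl hbs
    | some b =>
      simp only [Option.getD_some] at hble
      cases tl with
      | none => simp at htl
      | some lens =>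
        simp only [Option.getD_some] at htl
        cases lens with
        | nil => exact absurd rfl htl
        | cons l0 rest =>
          intro heq
          have hstep0 : pvStepA budget (some b) ([], 0, 0, 0) (0, l0) = ([(0, 0)], 0, l0, 1) := by
            simp [pvStepA, hble]
          -- A's first range is the spurious (0, 0)
          obtain ⟨t, ht⟩ := pvFoldAccPrefix budget (some b) (PySem.List.enumerate rest 1)
            ([(0, 0)], 0, l0, 1)
          have hheadA : (build_batch_ranges_py total (some b) (some budget) (some (l0 :: rest))).head? = some (0, 0) := by
            unfold build_batch_ranges_py
            simp only [if_neg h0]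
            rw [PySem.List.enumerate_cons, List.foldl_cons, hstep0, show (0 : Int) + 1 = 1 by ring, ht]
            simp
          -- B's first range ends at a positive cut point or at total_inputs ≠ 0
          obtain ⟨suff, hs, hall⟩ := pvOuterCuts budget (some b) (l0 :: rest) (PySem.List.len (l0 :: rest)) ((PySem.List.len (l0 :: rest) - 0).toNat) [0] 0
          have hheadB : ∃ x, (build_batch_ranges_py_alt total (some b) (some budget) (some (l0 :: rest))).head? = some (0, x) ∧ x ≠ 0 := by
            unfold build_batch_ranges_py_alt
            simp only [if_neg h0]
            unfold pvOuter
            rw [hs]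
            cases suff with
            | nil => exact ⟨total, by simp, h0⟩
            | cons s1 ss =>
              refine ⟨s1, by simp [List.zip_cons_cons], ?_⟩
              have := hall s1 (by simp)
              omega
          obtain ⟨x, hBx, hx0⟩ := hheadB
          have hcontr : (some ((0 : Int), (0 : Int))) = some ((0 : Int), x) := by
            rw [← hheadA, heq, hBx]
          simp only [Option.some.injEq, Prod.mk.injEq] at hcontr
          exact hx0 hcontr.2.symm
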